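-- pv_equiv track=rewrite | github.com/aleksisch/dasfuzz | grammar_based/convert.py | remove_grammar_actions
-- ===== SOURCE A (Python) =====
-- def remove_grammar_actions(grammar):
--     """Delete all the C code handling tokens."""
--
--     remaining = ''
--
--     scope = 0
--     string = False
--
--     for ch in grammar:
--
--         if ch == '{' and not(string):
--             scope += 1
--
--         elif ch == '}' and not(string):
--             assert(scope > 0)
--             scope -= 1
--
--         elif scope == 0:
--             remaining += ch
--             if ch == '"' or ch == "'":
--                 string = not(string)
--
--     return remaining
-- ===== SOURCE B (Python) =====
-- def remove_grammar_actions(grammar):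
--     """Delete all the C code handling tokens."""
--     out = []
--     i = 0
--     n = len(grammar)
--     while i < n:
--         ch = grammar[i]
--         if ch == '{':
--             # skip a whole brace-balanced action block, emitting nothing
--             depth = 1
--             i += 1
--             while i < n and depth > 0:
--                 if grammar[i] == '{':
--                     depth += 1
--                 elif grammar[i] == '}':
--                     depth -= 1
--                 i += 1
--         elif ch == '}':
--             assert False, "unbalanced '}' at top level"
--         elif ch == '"' or ch == "'":
--             # copy a quoted literal verbatim (either quote kind closes it)
--             out.append(ch)
--             i += 1
--             while i < n:
--                 c = grammar[i]
--                 out.append(c)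
--                 i += 1
--                 if c == '"' or c == "'":
--                     break
--         else:
--             out.append(ch)
--             i += 1
--     return ''.join(out)
-- ===== Notes on version B (the rewrite author's own statement) =====
-- stated objective: alternative
-- what changed: Replaces A's single flat pass with a shared scope counter and string flag by an index-driven scanner with dedicated inner loops: one that copies a quoted literal to its closing quote and one that skips a brace-balanced action block with a local depth counter; Pre_ excludes strings with an unmatched top-level '}' outside a quoted literal, on which both A and B raise AssertionError.
-- outside the precondition, e.g. on remove_grammar_actions('}'): A raises AssertionError, B raises AssertionError
import Mathlib
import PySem

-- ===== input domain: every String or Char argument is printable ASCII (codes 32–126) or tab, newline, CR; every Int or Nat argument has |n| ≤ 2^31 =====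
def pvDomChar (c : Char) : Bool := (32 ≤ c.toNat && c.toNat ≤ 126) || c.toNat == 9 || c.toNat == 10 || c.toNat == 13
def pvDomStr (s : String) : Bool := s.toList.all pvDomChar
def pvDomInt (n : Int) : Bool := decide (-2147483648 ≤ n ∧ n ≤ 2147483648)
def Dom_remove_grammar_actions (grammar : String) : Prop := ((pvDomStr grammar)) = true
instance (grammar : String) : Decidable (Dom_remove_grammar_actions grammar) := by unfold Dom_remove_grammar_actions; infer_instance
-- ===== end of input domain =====

-- B rewrites A's flat scope/string-flag scanner as an index-style scanner with
-- dedicated inner loops for quoted literals and brace blocks (objective: alternative decomposition, same cost).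

-- ===== PORT A =====
-- A's loop state: (remaining, scope, string).  The `assert(scope > 0)` raises
-- exactly when scope would go negative; those inputs are excluded by Pre_ below,
-- so the port simply decrements there.
def pvAStep (st : List Char × Int × Bool) (ch : Char) : List Char × Int × Bool :=
  if ch = '{' ∧ st.2.2 = false then (st.1, st.2.1 + 1, st.2.2)
  else if ch = '}' ∧ st.2.2 = false then (st.1, st.2.1 - 1, st.2.2)
  else if st.2.1 = 0 then
    (st.1 ++ [ch], st.2.1, if ch = '"' ∨ ch = '\'' then !st.2.2 else st.2.2)
  else st

def remove_grammar_actions (grammar : String) : String :=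
  String.ofList (grammar.toList.foldl pvAStep ([], 0, false)).1

-- ===== PORT B =====
-- inner loop: copy characters until (and including) the next quote of either kind
def pvAltString : List Char → List Char × List Char
  | [] => ([], [])
  | c :: cs =>
    if c = '"' ∨ c = '\'' then ([c], cs)
    else
      let p := pvAltString cs
      (c :: p.1, p.2)

-- inner loop: skip a brace block, tracking local depth; emits nothing
def pvAltBrace : List Char → Int → List Char
  | [], _ => []
  | c :: cs, d =>
    if c = '{' then pvAltBrace cs (d + 1)
    else if c = '}' then (if d = 1 then cs else pvAltBrace cs (d - 1))
    else pvAltBrace cs d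

theorem pvAltString_rest_le : ∀ (l : List Char), (pvAltString l).2.length ≤ l.length := by
  intro l
  induction l with
  | nil => simp [pvAltString]
  | cons c cs ih =>
    simp only [pvAltString]
    split
    · simp
    · simpa using Nat.le_succ_of_le ih

theorem pvAltBrace_le : ∀ (l : List Char) (d : Int), (pvAltBrace l d).length ≤ l.length := by
  intro l
  induction l with
  | nil => intro d; simp [pvAltBrace]
  | cons c cs ih =>
    intro d
    simp only [pvAltBrace]
    split
    · exact Nat.le_succ_of_le (ih _)
    · split
      · split
        · simp
        · exact Nat.le_succ_of_le (ih _)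
      · exact Nat.le_succ_of_le (ih _)

-- top-level loop; a top-level '}' is where B's Python asserts (outside Pre_): the port skips it
def pvAltTop : List Char → List Char
  | [] => []
  | c :: cs =>
    if c = '{' then pvAltTop (pvAltBrace cs 1)
    else if c = '}' then pvAltTop cs
    else if c = '"' ∨ c = '\'' then c :: ((pvAltString cs).1 ++ pvAltTop (pvAltString cs).2)
    else c :: pvAltTop cs
termination_by l => l.length
decreasing_by
  · exact Nat.lt_succ_of_le (pvAltBrace_le cs 1)
  · exact Nat.lt_succ_self _
  · exact Nat.lt_succ_of_le (pvAltString_rest_le cs)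
  · exact Nat.lt_succ_self _

def remove_grammar_actions_alt (grammar : String) : String :=
  String.ofList (pvAltTop grammar.toList)

-- ===== PRECONDITION & SPEC =====
-- the abstract (scope, string) automaton of the grammar scanner, used only to state Pre_
def pvStep (s : Int × Bool) (c : Char) : Int × Bool :=
  if c = '{' ∧ s.2 = false then (s.1 + 1, s.2)
  else if c = '}' ∧ s.2 = false then (s.1 - 1, s.2)
  else if s.1 = 0 ∧ (c = '"' ∨ c = '\'') then (s.1, !s.2)
  else s

-- Pre_ excludes exactly the strings with an unmatched top-level '}' outside a quoted
-- literal: there Python A (and B) raise AssertionError.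
def Pre_remove_grammar_actions (grammar : String) : Prop :=
  ∀ p ∈ grammar.toList.inits, 0 ≤ (p.foldl pvStep (0, false)).1
instance (grammar : String) : Decidable (Pre_remove_grammar_actions grammar) := by
  unfold Pre_remove_grammar_actions; infer_instance

def pvWitness_remove_grammar_actions : String := "id: 'x' { act {n} } \"y\""

def Spec_remove_grammar_actions (grammar : String) (out : String) : Prop := out = remove_grammar_actions_alt grammar
instance (grammar : String) (out : String) : Decidable (Spec_remove_grammar_actions grammar out) := by unfold Spec_remove_grammar_actions; infer_instance

-- ===== CLAIM (what is proved, stated in full; the proofs are below) =====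
def Claim_equal_remove_grammar_actions : Prop := ∀ (grammar : String), Dom_remove_grammar_actions grammar → Pre_remove_grammar_actions grammar → Spec_remove_grammar_actions grammar (remove_grammar_actions grammar)

-- ===== LEMMAS AND PROOFS =====

def pvGoodFrom (st : Int × Bool) (l : List Char) : Prop :=
  ∀ p ∈ l.inits, 0 ≤ (p.foldl pvStep st).1

theorem pvGoodFrom_cons {st : Int × Bool} {c : Char} {l : List Char}
    (h : pvGoodFrom st (c :: l)) : pvGoodFrom (pvStep st c) l := by
  intro p hp
  rw [List.mem_inits] at hp
  obtain ⟨t, rfl⟩ := hp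
  have := h (c :: (p ++ t).take p.length) (by rw [List.mem_inits]; exact ⟨(p ++ t).drop p.length, by simp⟩)
  simpa using this

theorem pvGoodFrom_head {st : Int × Bool} {c : Char} {l : List Char}
    (h : pvGoodFrom st (c :: l)) : 0 ≤ (pvStep st c).1 := by
  have := h [c] (by simp)
  simpa using this

-- during a brace block quotes and other chars leave the state alone; when it closes we are back at (0,false)
theorem pvGood_brace : ∀ (l : List Char) (d : Int), 1 ≤ d →
    pvGoodFrom (d, false) l → pvGoodFrom (0, false) (pvAltBrace l d) := by
  intro l
  induction l with
  | nil =>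
    intro d _ _
    intro p hp
    simp [pvAltBrace] at hp
    simp [hp]
  | cons c cs ih =>
    intro d hd h
    by_cases hc : c = '{'
    · have h' := pvGoodFrom_cons h
      simp only [pvStep, hc, hd] at h'
      simp only [pvAltBrace, hc, if_pos rfl]
      exact ih (d + 1) (by omega) (by simpa using h')
    · by_cases hc2 : c = '}'
      · have h' := pvGoodFrom_cons h
        simp only [pvStep, hc, hc2] at h'
        simp only [pvAltBrace, hc, hc2, if_neg, if_pos rfl, ite_true, ite_false]
        by_cases hd1 : d = 1
        · subst hd1
          simp only [if_pos rfl]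
          simpa using h'
        · simp only [if_neg hd1]
          exact ih (d - 1) (by omega) (by simpa using h')
      · have h' := pvGoodFrom_cons h
        have hdz : ¬ (d = 0 ∧ (c = '"' ∨ c = '\'')) := by
          rintro ⟨h0, -⟩; omega
        simp only [pvStep, hc, hc2, hdz, false_and, and_false, if_neg, ite_false] at h'
        simp only [pvAltBrace, hc, hc2, ite_false, if_neg]
        exact ih d hd (by simpa using h')

-- inside a string everything is copied; when it closes we are back at (0,false)
theorem pvGood_string : ∀ (l : List Char),
    pvGoodFrom (0, true) l → pvGoodFrom (0, false) (pvAltString l).2 := by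
  intro l
  induction l with
  | nil =>
    intro _ p hp
    simp [pvAltString] at hp
    simp [hp]
  | cons c cs ih =>
    intro h
    by_cases hq : c = '"' ∨ c = '\''
    · have h' := pvGoodFrom_cons h
      have hc1 : c ≠ '{' := by rcases hq with rfl | rfl <;> decide
      have hc2 : c ≠ '}' := by rcases hq with rfl | rfl <;> decide
      simp only [pvStep, hc1, hc2, hq, false_and, if_neg, and_true, true_and, if_pos,
        ite_false, ite_true] at h'
      simp only [pvAltString, hq, if_pos]
      simpa using h'
    · have h' := pvGoodFrom_cons h
      simp only [pvStep, hq, false_and, and_false, if_neg, ite_false] at h'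
      simp only [pvAltString, hq, if_neg, ite_false]
      exact ih (by simpa using h')

-- A's fold in string state copies chars exactly as pvAltString does
theorem pvFold_string : ∀ (l : List Char) (acc : List Char),
    (l.foldl pvAStep (acc, 0, true)).1
      = ((pvAltString l).2.foldl pvAStep (acc ++ (pvAltString l).1, 0, false)).1 := by
  intro l
  induction l with
  | nil => intro acc; simp [pvAltString]
  | cons c cs ih =>
    intro acc
    by_cases hq : c = '"' ∨ c = '\''
    · have hc1 : c ≠ '{' := by rcases hq with rfl | rfl <;> decide
      have hc2 : c ≠ '}' := by rcases hq with rfl | rfl <;> decide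
      simp only [List.foldl_cons, pvAStep, hc1, hc2, hq, false_and, if_neg, if_pos,
        ite_false, ite_true, pvAltString, Bool.not_true]
    · simp only [List.foldl_cons, pvAStep, hq, false_and, and_false, if_neg, if_pos,
        ite_false, ite_true, pvAltString]
      simpa using ih (acc ++ [c])

-- A's fold at scope ≥ 1 emits nothing and agrees with pvAltBrace on the remaining output
theorem pvFold_brace : ∀ (l : List Char) (d : Int) (acc : List Char), 1 ≤ d →
    (l.foldl pvAStep (acc, d, false)).1
      = ((pvAltBrace l d).foldl pvAStep (acc, 0, false)).1 := by
  intro l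
  induction l with
  | nil => intro d acc _; simp [pvAltBrace]
  | cons c cs ih =>
    intro d acc hd
    by_cases hc : c = '{'
    · simp only [List.foldl_cons, pvAStep, hc, true_and, if_pos, ite_true, pvAltBrace]
      exact ih (d + 1) acc (by omega)
    · by_cases hc2 : c = '}'
      · simp only [List.foldl_cons, pvAStep, hc, hc2, true_and, if_neg, if_pos,
          ite_false, ite_true, pvAltBrace]
        by_cases hd1 : d = 1
        · subst hd1; simp
        · simp only [if_neg hd1]
          exact ih (d - 1) acc (by omega)
      · have hdz : d ≠ 0 := by omega
        simp only [List.foldl_cons, pvAStep, hc, hc2, hdz, false_and, if_neg, ite_false,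
          pvAltBrace]
        exact ih d acc hd

theorem pvFold_top : ∀ (l : List Char) (acc : List Char),
    pvGoodFrom (0, false) l →
    (l.foldl pvAStep (acc, 0, false)).1 = acc ++ pvAltTop l := by
  intro l
  induction l using pvAltTop.induct with
  | case1 => intro acc _; simp [pvAltTop]
  | case2 cs ih =>
    intro acc h
    have h' := pvGoodFrom_cons h
    have e1 : pvStep (0, false) '{' = (1, false) := by simp [pvStep]
    rw [e1] at h'
    have e2 : List.foldl pvAStep (acc, 0, false) ('{' :: cs)
        = List.foldl pvAStep (acc, 1, false) cs := by simp [pvAStep]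
    rw [e2, pvFold_brace cs 1 acc (by omega), ih acc (pvGood_brace cs 1 (by omega) h')]
    simp [pvAltTop]
  | case3 cs hne ih =>
    intro acc h
    have h' := pvGoodFrom_head h
    have e1 : pvStep (0, false) '}' = (-1, false) := by simp [pvStep]
    rw [e1] at h'
    norm_num at h'
  | case4 c cs hc hc2 hq ih =>
    intro acc h
    have h' := pvGoodFrom_cons h
    have e1 : pvStep (0, false) c = (0, true) := by simp [pvStep, hc, hc2, hq]
    rw [e1] at h'
    have e2 : List.foldl pvAStep (acc, 0, false) (c :: cs)
        = List.foldl pvAStep (acc ++ [c], 0, true) cs := by simp [pvAStep, hc, hc2, hq]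
    rw [e2, pvFold_string cs (acc ++ [c]),
      ih (acc ++ [c] ++ (pvAltString cs).1) (pvGood_string cs h')]
    simp [pvAltTop, hc, hc2, hq]
  | case5 c cs hc hc2 hq ih =>
    intro acc h
    have h' := pvGoodFrom_cons h
    have e1 : pvStep (0, false) c = (0, false) := by simp [pvStep, hc, hc2, hq]
    rw [e1] at h'
    have e2 : List.foldl pvAStep (acc, 0, false) (c :: cs)
        = List.foldl pvAStep (acc ++ [c], 0, false) cs := by simp [pvAStep, hc, hc2, hq]
    rw [e2, ih (acc ++ [c]) h']
    simp [pvAltTop, hc, hc2, hq]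

-- ===== VERDICT (by name: the statement is the Claim_ definition above) =====
theorem remove_grammar_actions_spec : Claim_equal_remove_grammar_actions := by
  intro grammar _ hpre
  unfold Spec_remove_grammar_actions remove_grammar_actions remove_grammar_actions_alt
  have := pvFold_top grammar.toList [] hpre
  simp [this]
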